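-- pv_equiv track=rewrite | github.com/Black-Field/PULSE-MONITOR | pulsation.py | get_pulse
-- ===== SOURCE A (Python) =====
-- def get_pulse(x, y):
--     """脈拍を得るための関数"""
--     n = len(y)
--     p = 0
--     for i in range(n-3):
--         A1 = y[i]
--         A2 = y[i+1]
--         A3 = y[i+2]
--         diff1 = abs(A1-A2)
--         diff2 = abs(A3-A2)
--         diff = abs(diff1-diff2)
--         if diff>= 1 :
--             p += 1;
--     bb = p*6
--     return bb
-- ===== SOURCE B (Python) =====
-- def get_pulse(x, y):
--     """脈拍を得るための関数"""
--     d = [abs(y[k + 1] - y[k]) for k in range(len(y) - 1)]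
--     runs = []
--     for v in d[:-1]:
--         if not runs or runs[-1] != v:
--             runs.append(v)
--     return 6 * max(len(runs) - 1, 0)
-- ===== Notes on version B (the rewrite author's own statement) =====
-- stated objective: alternative
-- what changed: Instead of scanning index triples and testing each second difference, B builds the first-difference table, run-length-compresses its prefix d[:-1] into a list of runs of equal values, and returns 6*(number of runs - 1), since each adjacent change is exactly one run boundary.
import Mathlib
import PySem

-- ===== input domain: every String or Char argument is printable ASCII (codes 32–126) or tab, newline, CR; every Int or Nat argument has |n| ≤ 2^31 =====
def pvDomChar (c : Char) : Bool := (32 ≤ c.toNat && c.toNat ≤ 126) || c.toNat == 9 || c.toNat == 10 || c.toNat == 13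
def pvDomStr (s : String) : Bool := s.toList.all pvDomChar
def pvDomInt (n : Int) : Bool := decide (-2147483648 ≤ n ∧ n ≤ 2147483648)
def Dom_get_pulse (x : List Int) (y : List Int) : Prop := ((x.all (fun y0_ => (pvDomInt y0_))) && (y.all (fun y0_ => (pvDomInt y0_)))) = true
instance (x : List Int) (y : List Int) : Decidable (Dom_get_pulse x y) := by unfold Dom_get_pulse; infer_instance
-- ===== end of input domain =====

-- B replaces the triple-indexing scan with a first-difference table that is
-- run-length-compressed: the count of large second differences equals the
-- number of run boundaries in d[:-1] (alternative decomposition, same cost).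


-- ===== PORT A =====
-- indices i, i+1, i+2 are always in range for i ∈ range(n-3), so pyGetD is exact here
def get_pulse (x : List Int) (y : List Int) : Int :=
  let n : Int := y.length
  let p := (PySem.List.pyRange 0 (n - 3) 1).foldl (fun p i =>
    let A1 := PySem.List.pyGetD y i 0
    let A2 := PySem.List.pyGetD y (i + 1) 0
    let A3 := PySem.List.pyGetD y (i + 2) 0
    let diff1 := |A1 - A2|
    let diff2 := |A3 - A2|
    let diff := |diff1 - diff2|
    if diff ≥ 1 then p + 1 else p) 0
  p * 6

-- ===== PORT B =====
def get_pulse_alt (x : List Int) (y : List Int) : Int :=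
  let d := (PySem.List.pyRange 0 ((y.length : Int) - 1) 1).map
    (fun k => |PySem.List.pyGetD y (k + 1) 0 - PySem.List.pyGetD y k 0|)
  let runs := (PySem.List.slice d none (some (-1))).foldl
    (fun runs v => if runs = [] ∨ runs.getLast? ≠ some v then runs ++ [v] else runs) []
  6 * max ((runs.length : Int) - 1) 0

-- ===== PRECONDITION & SPEC =====
def Spec_get_pulse (x : List Int) (y : List Int) (out : Int) : Prop := out = get_pulse_alt x y
instance (x : List Int) (y : List Int) (out : Int) : Decidable (Spec_get_pulse x y out) := by unfold Spec_get_pulse; infer_instance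

-- ===== CLAIM =====
def Claim_equal_get_pulse : Prop := ∀ (x : List Int) (y : List Int), Dom_get_pulse x y → Spec_get_pulse x y (get_pulse x y)

-- ===== LEMMAS AND PROOFS =====

-- number of adjacent unequal pairs in a list
def pvCnt : List Int → Nat
  | a :: b :: t => (if a ≠ b then 1 else 0) + pvCnt (b :: t)
  | _ => 0

theorem pvCnt_cons_cons (a b : Int) (t : List Int) :
    pvCnt (a :: b :: t) = (if a ≠ b then 1 else 0) + pvCnt (b :: t) := rfl

theorem pvCnt_short (l : List Int) (h : l.length ≤ 1) : pvCnt l = 0 := by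
  match l, h with
  | [], _ => rfl
  | [a], _ => rfl

theorem pvCnt_drop (w : List Int) (a : Nat) (h : a + 1 < w.length) :
    pvCnt (w.drop a) = (if w[a] ≠ w[a + 1] then 1 else 0) + pvCnt (w.drop (a + 1)) := by
  rw [List.drop_eq_getElem_cons (by omega), List.drop_eq_getElem_cons (l := w) (i := a + 1) h]
  rfl

-- the run-building fold: the result length counts one per change from the running last element
theorem runs_len (w : List Int) : ∀ (acc : List Int) (t : Int), acc.getLast? = some t →
    (w.foldl (fun runs v => if runs = [] ∨ runs.getLast? ≠ some v then runs ++ [v] else runs)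
      acc).length = acc.length + pvCnt (t :: w) := by
  induction w with
  | nil => intro acc t _; simp [pvCnt]
  | cons v w' ih =>
    intro acc t ht
    have hne : acc ≠ [] := by rintro rfl; simp at ht
    simp only [List.foldl_cons]
    by_cases htv : t = v
    · subst htv
      rw [if_neg (by simp [hne, ht])]
      rw [ih acc t ht, pvCnt_cons_cons]
      simp
    · rw [if_pos (by right; rw [ht]; simp [htv])]
      rw [ih (acc ++ [v]) v (by simp), pvCnt_cons_cons]
      simp [htv]
      omega

-- B's result on the list w = d[:-1] equals 6 * (adjacent changes in w)
theorem alt_eq_cnt (w : List Int) :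
    (6 : Int) * max (((w.foldl (fun runs v =>
        if runs = [] ∨ runs.getLast? ≠ some v then runs ++ [v] else runs) []).length : Int) - 1) 0
      = 6 * pvCnt w := by
  cases w with
  | nil => simp [pvCnt]
  | cons v w' =>
    rw [List.foldl_cons, if_pos (Or.inl rfl), List.nil_append]
    rw [runs_len w' [v] v (by simp)]
    simp only [List.length_singleton]
    push_cast
    rw [show (1 : Int) + (pvCnt (v :: w') : Int) - 1 = (pvCnt (v :: w') : Int) from by ring]
    have hm : max ((pvCnt (v :: w') : Int)) 0 = (pvCnt (v :: w') : Int) :=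
      max_eq_left (Int.natCast_nonneg _)
    rw [hm]

-- A's counting loop over indices a..len(w)-2 computes the adjacent-change count of w.drop a
theorem fold_cnt (w : List Int) (a : Int) (ha : 0 ≤ a) (p0 : Int) :
    (PySem.List.pyRange a ((w.length : Int) - 1) 1).foldl (fun p i =>
        if PySem.List.pyGetD w i 0 ≠ PySem.List.pyGetD w (i + 1) 0 then p + 1 else p) p0
      = p0 + pvCnt (w.drop a.toNat) := by
  by_cases h : a < (w.length : Int) - 1
  · rw [PySem.List.pyRange_one_cons h]
    simp only [List.foldl_cons]
    have h1 : a.toNat + 1 < w.length := by omega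
    have e1 : PySem.List.pyGetD w a 0 = w[a.toNat] :=
      PySem.List.pyGetD_eq_getElem w (i := a) 0 ha (by omega)
    have e2 : PySem.List.pyGetD w (a + 1) 0 = w[a.toNat + 1] := by
      rw [PySem.List.pyGetD_eq_getElem w (i := a + 1) 0 (by omega) (by omega)]
      congr 1
      omega
    have hrec := fold_cnt w (a + 1) (by omega)
    have hdrop : (a + 1).toNat = a.toNat + 1 := by omega
    rw [e1, e2, pvCnt_drop w a.toNat h1]
    by_cases hc : w[a.toNat] ≠ w[a.toNat + 1]
    · rw [if_pos hc, if_pos hc, hrec, hdrop]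
      push_cast; ring
    · rw [if_neg hc, if_neg hc, hrec, hdrop]
      simp
  · rw [PySem.List.pyRange_one_eq_nil (by omega)]
    rw [pvCnt_short _ (by simp; omega)]
    simp
termination_by ((w.length : Int) - 1 - a).toNat
decreasing_by omega

-- ===== VERDICT =====
theorem get_pulse_spec : Claim_equal_get_pulse := by
  intro x y _
  show get_pulse x y = get_pulse_alt x y
  unfold get_pulse get_pulse_alt
  simp only []
  set n := y.length with hn
  set d := (PySem.List.pyRange 0 ((n : Int) - 1) 1).map
    (fun k => |PySem.List.pyGetD y (k + 1) 0 - PySem.List.pyGetD y k 0|) with hd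
  have hdlen : d.length = ((n : Int) - 1).toNat := by
    simp [hd, PySem.List.length_pyRange_one]
  rw [PySem.List.slice_to_neg_one]
  set w := d.dropLast with hw
  rw [alt_eq_cnt w]
  by_cases h2 : 2 ≤ n
  · have hwlen : w.length = n - 2 := by
      simp [hw, List.length_dropLast, hdlen]; omega
    have hbound : (n : Int) - 3 = (w.length : Int) - 1 := by rw [hwlen]; omega
    rw [hbound]
    have hwgel : ∀ (j : Int), 0 ≤ j → j < (w.length : Int) →
        PySem.List.pyGetD w j 0 =
          |PySem.List.pyGetD y (j + 1) 0 - PySem.List.pyGetD y j 0| := by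
      intro j hj0 hj1
      rw [PySem.List.pyGetD_eq_getElem w (i := j) 0 hj0 (by omega)]
      simp only [hw, hd, List.getElem_dropLast, List.getElem_map,
        PySem.List.getElem_pyRange_one, zero_add, Int.toNat_of_nonneg hj0]
    have hbody : ∀ (p i : Int), i ∈ PySem.List.pyRange 0 ((w.length : Int) - 1) 1 →
        (if |(|PySem.List.pyGetD y i 0 - PySem.List.pyGetD y (i + 1) 0|) -
             (|PySem.List.pyGetD y (i + 2) 0 - PySem.List.pyGetD y (i + 1) 0|)| ≥ 1
         then p + 1 else p)
        = (if PySem.List.pyGetD w i 0 ≠ PySem.List.pyGetD w (i + 1) 0 then p + 1 else p) := by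
      intro p i hi
      rw [PySem.List.mem_pyRange_one] at hi
      obtain ⟨hi0, hi1⟩ := hi
      rw [hwgel i hi0 (by omega), hwgel (i + 1) (by omega) (by omega)]
      have hc : i + 1 + 1 = i + 2 := by ring
      rw [hc]
      set a := |PySem.List.pyGetD y (i + 1) 0 - PySem.List.pyGetD y i 0| with hA
      set b := |PySem.List.pyGetD y (i + 2) 0 - PySem.List.pyGetD y (i + 1) 0| with hB
      have hcomm : |PySem.List.pyGetD y i 0 - PySem.List.pyGetD y (i + 1) 0| = a :=
        abs_sub_comm _ _
      rw [hcomm]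
      by_cases hab : a = b
      · simp [hab]
      · have : 1 ≤ |a - b| := Int.one_le_abs (sub_ne_zero.mpr hab)
        simp [hab, this]
    rw [PySem.List.foldl_congr_mem _ _ (fun p i =>
      if PySem.List.pyGetD w i 0 ≠ PySem.List.pyGetD w (i + 1) 0 then p + 1 else p) _ hbody]
    have hf := fold_cnt w 0 (le_refl (0 : Int)) 0
    rw [hf]
    simp
    ring
  · -- n ≤ 1: range(n-3) is empty and w is empty (d has at most one element)
    have hwnil : w = [] := by
      have : w.length = 0 := by
        simp [hw, List.length_dropLast, hdlen]; omega
      exact List.length_eq_zero_iff.mp this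
    rw [PySem.List.pyRange_one_eq_nil (by omega), hwnil]
    simp [pvCnt]
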